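-- pv_equiv track=rewrite | github.com/nrupatunga/adventofcode | 20/part1.py | compare_tile
-- ===== SOURCE A (Python) =====
-- def compare_tile(tile, tile_dict, tile_no, index):
--     border = tile[index]
--     border_list = []
--     border_list_r = []
--
--     for key, item in tile_dict.items():
--         if key == tile_no:
--             continue
--         for b in item:
--             border_list.append(b)
--             border_list_r.append(b[::-1])
--
--     status = False
--     border_r = border[::-1]
--     status = border in border_list or border in border_list_r
--     status = status or (border_r in border_list or border_r in border_list_r)
--
--     return status
-- ===== SOURCE B (Python) =====
-- def compare_tile(tile, tile_dict, tile_no, index):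
--     border = tile[index]
--     targets = {border, border[::-1]}
--     for key, item in tile_dict.items():
--         if key == tile_no:
--             continue
--         for b in item:
--             if b in targets or b[::-1] in targets:
--                 return True
--     return False
-- ===== Notes on version B (the rewrite author's own statement) =====
-- stated objective: simpler
-- what changed: Instead of building two full lists of all other tiles' borders and their reversals and then running four membership tests, B keeps only the two search targets {border, border[::-1]} in a set and does a single early-exiting scan over the other tiles' borders.
import Mathlib
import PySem

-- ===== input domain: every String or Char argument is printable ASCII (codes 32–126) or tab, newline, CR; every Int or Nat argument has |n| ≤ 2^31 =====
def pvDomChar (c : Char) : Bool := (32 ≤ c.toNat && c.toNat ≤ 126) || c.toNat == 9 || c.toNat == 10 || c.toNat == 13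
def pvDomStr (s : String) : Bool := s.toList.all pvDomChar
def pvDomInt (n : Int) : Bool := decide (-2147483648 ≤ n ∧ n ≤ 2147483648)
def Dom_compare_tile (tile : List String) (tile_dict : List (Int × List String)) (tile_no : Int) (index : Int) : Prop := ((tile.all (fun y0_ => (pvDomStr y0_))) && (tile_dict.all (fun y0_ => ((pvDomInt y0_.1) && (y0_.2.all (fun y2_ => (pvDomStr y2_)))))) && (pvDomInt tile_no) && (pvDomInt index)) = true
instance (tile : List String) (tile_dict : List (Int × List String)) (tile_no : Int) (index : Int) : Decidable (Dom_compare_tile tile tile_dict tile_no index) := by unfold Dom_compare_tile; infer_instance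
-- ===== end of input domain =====

-- B replaces A's "build two full lists of all other borders and their reversals, then four
-- membership tests" with a single early-exiting scan against the two-element target set
-- {border, border[::-1]} (objective: simpler).

-- shared primitive: Python's s[::-1]
def pyRev (s : String) : String := (PySem.Str.slice? s none none (-1)).getD ""

-- ===== PORT A =====
def compare_tile (tile : List String) (tile_dict : List (Int × List String)) (tile_no : Int) (index : Int) : Bool :=
  match PySem.List.pyGet? tile index with
  | none => false   -- IndexError in Python; excluded by Pre_
  | some border =>
    let p := tile_dict.foldl
      (fun (st : List String × List String) kv =>
        if kv.1 == tile_no then st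
        else kv.2.foldl (fun (st2 : List String × List String) b => (st2.1 ++ [b], st2.2 ++ [pyRev b])) st)
      ([], [])
    let border_list := p.1
    let border_list_r := p.2
    let border_r := pyRev border
    let status := border_list.contains border || border_list_r.contains border
    status || (border_list.contains border_r || border_list_r.contains border_r)

-- ===== PORT B =====
-- scan the other tiles' borders, returning true at the first hit (Python's early `return True`)
def altScan (targets : PySem.Set String) (tile_no : Int) : List (Int × List String) → Bool
  | [] => false
  | (key, item) :: rest =>
    if key == tile_no then altScan targets tile_no rest
    else if item.any (fun b => PySem.Set.contains targets b || PySem.Set.contains targets (pyRev b)) then true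
    else altScan targets tile_no rest

def compare_tile_alt (tile : List String) (tile_dict : List (Int × List String)) (tile_no : Int) (index : Int) : Bool :=
  match PySem.List.pyGet? tile index with
  | none => false   -- IndexError in Python; excluded by Pre_
  | some border =>
    let targets : PySem.Set String := PySem.Set.ofList [border, pyRev border]
    altScan targets tile_no tile_dict

-- ===== PRECONDITION & SPEC =====
-- Pre_ excludes exactly the inputs where tile[index] raises IndexError (both A and B raise there).
def Pre_compare_tile (tile : List String) (tile_dict : List (Int × List String)) (tile_no : Int) (index : Int) : Prop :=
  PySem.Raise.InRange tile.length index
instance (tile : List String) (tile_dict : List (Int × List String)) (tile_no : Int) (index : Int) : Decidable (Pre_compare_tile tile tile_dict tile_no index) := by unfold Pre_compare_tile; infer_instance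

def pvWitness_compare_tile : List String × (List (Int × List String)) × Int × Int :=
  (["ab", "cd"], [(2, ["ba", "xy"]), (1, ["zz"])], 1, 0)

def Spec_compare_tile (tile : List String) (tile_dict : List (Int × List String)) (tile_no : Int) (index : Int) (out : Bool) : Prop := out = compare_tile_alt tile tile_dict tile_no index
instance (tile : List String) (tile_dict : List (Int × List String)) (tile_no : Int) (index : Int) (out : Bool) : Decidable (Spec_compare_tile tile tile_dict tile_no index out) := by unfold Spec_compare_tile; infer_instance

-- ===== CLAIM (what is proved, stated in full; the proofs are below) =====
def Claim_equal_compare_tile : Prop := ∀ (tile : List String) (tile_dict : List (Int × List String)) (tile_no : Int) (index : Int), Dom_compare_tile tile tile_dict tile_no index → Pre_compare_tile tile tile_dict tile_no index → Spec_compare_tile tile tile_dict tile_no index (compare_tile tile tile_dict tile_no index)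

-- ===== LEMMAS AND PROOFS =====

theorem pyRev_eq (s : String) : pyRev s = String.ofList s.toList.reverse := by
  simp [pyRev, PySem.Str.slice?_none_none_neg_one]

theorem pyRev_pyRev (s : String) : pyRev (pyRev s) = s := by
  simp [pyRev_eq]

-- the list of all other tiles' borders, in A's traversal order
def othersF (tile_no : Int) : List (Int × List String) → List String
  | [] => []
  | (key, item) :: rest => if key == tile_no then othersF tile_no rest else item ++ othersF tile_no rest

theorem inner_fold (l : List String) (x y : List String) :
    l.foldl (fun (st2 : List String × List String) b => (st2.1 ++ [b], st2.2 ++ [pyRev b])) (x, y)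
      = (x ++ l, y ++ l.map pyRev) := by
  induction l generalizing x y with
  | nil => simp
  | cons b t ih => simp [List.foldl, ih]

theorem outer_fold (tile_no : Int) (td : List (Int × List String)) (x y : List String) :
    td.foldl
      (fun (st : List String × List String) kv =>
        if kv.1 == tile_no then st
        else kv.2.foldl (fun (st2 : List String × List String) b => (st2.1 ++ [b], st2.2 ++ [pyRev b])) st)
      (x, y)
      = (x ++ othersF tile_no td, y ++ (othersF tile_no td).map pyRev) := by
  induction td generalizing x y with
  | nil => simp [othersF]
  | cons kv t ih =>
    obtain ⟨k, item⟩ := kv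
    simp only [List.foldl, othersF]
    by_cases h : (k == tile_no) = true
    · rw [if_pos h, if_pos h]
      exact ih x y
    · rw [if_neg h, if_neg h, inner_fold, ih]
      simp

theorem altScan_eq (targets : PySem.Set String) (tile_no : Int) (td : List (Int × List String)) :
    altScan targets tile_no td
      = (othersF tile_no td).any (fun b => PySem.Set.contains targets b || PySem.Set.contains targets (pyRev b)) := by
  induction td with
  | nil => simp [altScan, othersF]
  | cons kv t ih =>
    obtain ⟨k, item⟩ := kv
    by_cases h : k == tile_no
    · simp only [altScan, othersF, if_pos h]
      exact ih
    · simp only [altScan, othersF, if_neg h, List.any_append, ih]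
      cases hi : item.any (fun b => PySem.Set.contains targets b || PySem.Set.contains targets (pyRev b)) <;> simp

theorem mem_map_pyRev (L : List String) (s : String) : s ∈ L.map pyRev ↔ pyRev s ∈ L := by
  constructor
  · intro h
    rcases List.mem_map.1 h with ⟨b, hb, rfl⟩
    simpa [pyRev_pyRev] using hb
  · intro h
    exact List.mem_map.2 ⟨pyRev s, h, pyRev_pyRev s⟩

theorem main_bool (border : String) (L : List String) :
    ((L.contains border || (L.map pyRev).contains border)
      || (L.contains (pyRev border) || (L.map pyRev).contains (pyRev border)))
    = L.any (fun b =>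
        PySem.Set.contains (PySem.Set.ofList [border, pyRev border]) b
          || PySem.Set.contains (PySem.Set.ofList [border, pyRev border]) (pyRev b)) := by
  rw [Bool.eq_iff_iff]
  simp only [Bool.or_eq_true, List.contains_iff_mem, List.any_eq_true,
    PySem.Set.contains_eq_listContains, mem_map_pyRev, pyRev_pyRev, PySem.Set.mem_ofList,
    List.mem_cons, List.not_mem_nil, or_false]
  constructor
  · rintro ((h | h) | (h | h))
    · exact ⟨border, h, Or.inl (Or.inl rfl)⟩
    · exact ⟨pyRev border, h, Or.inl (Or.inr rfl)⟩
    · exact ⟨pyRev border, h, Or.inl (Or.inr rfl)⟩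
    · exact ⟨border, h, Or.inl (Or.inl rfl)⟩
  · rintro ⟨b, hb, (rfl | rfl) | (h | h)⟩
    · exact Or.inl (Or.inl hb)
    · exact Or.inr (Or.inl hb)
    · refine Or.inl (Or.inr ?_)
      rw [← h, pyRev_pyRev]; exact hb
    · have hb' : b = border := by rw [← pyRev_pyRev b, h, pyRev_pyRev]
      exact Or.inl (Or.inl (hb' ▸ hb))

-- ===== VERDICT (by name: the statement is the Claim_ definition above) =====
theorem compare_tile_spec : Claim_equal_compare_tile := by
  intro tile tile_dict tile_no index _hDom hPre
  unfold Pre_compare_tile at hPre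
  unfold Spec_compare_tile compare_tile compare_tile_alt
  cases hg : PySem.List.pyGet? tile index with
  | none => exact absurd hPre ((PySem.List.pyGet?_eq_none_iff tile index).1 hg)
  | some border =>
    simp only [outer_fold, altScan_eq, List.nil_append]
    exact main_bool border (othersF tile_no tile_dict)
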